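-- pv_equiv track=rewrite | github.com/nichwall/Encryption | decryptor4.py | dig_six
-- ===== SOURCE A (Python) =====
-- def dig_six(string,seed):
--     outStr = ''
--
--     tempStrs = []
--     for i in range(len(string)):
--         if i%4==0 and i<=len(string)-4:
--             tempStrs.append(string[i:i+4])
--         elif i%4==0 and i>len(string)-4:
--             tempStrs.append(string[i:])
--
--     for i in range(len(tempStrs)):
--         if len(tempStrs[i])==4:
--             tempChar0 = tempStrs[i][0]
--             tempChar2 = tempStrs[i][2]
--
--             tempStr = ''
--             tempStr+=tempChar2
--             tempStr+=tempStrs[i][1]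
--             tempStr+=tempChar0
--             tempStr+=tempStrs[i][3]
--         else:
--             tempStr = tempStrs[i]
--         outStr+= tempStr
--
--     return(outStr)
-- ===== SOURCE B (Python) =====
-- def dig_six(string, seed):
--     # One streaming pass: collect chars into a 4-char buffer and flush it
--     # with positions 0 and 2 swapped; a short trailing buffer is flushed as-is.
--     out = []
--     buf = []
--     for ch in string:
--         buf.append(ch)
--         if len(buf) == 4:
--             out.extend((buf[2], buf[1], buf[0], buf[3]))
--             buf = []
--     out.extend(buf)
--     return ''.join(out)
-- ===== Notes on version B (the rewrite author's own statement) =====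
-- stated objective: simpler
-- what changed: Replaced A's two-pass build-a-chunk-list-then-reassemble (index loop with slicing, then a second loop re-reading each chunk) by a single streaming pass over the characters with a 4-char buffer flushed with positions 0 and 2 swapped.
import Mathlib
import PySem

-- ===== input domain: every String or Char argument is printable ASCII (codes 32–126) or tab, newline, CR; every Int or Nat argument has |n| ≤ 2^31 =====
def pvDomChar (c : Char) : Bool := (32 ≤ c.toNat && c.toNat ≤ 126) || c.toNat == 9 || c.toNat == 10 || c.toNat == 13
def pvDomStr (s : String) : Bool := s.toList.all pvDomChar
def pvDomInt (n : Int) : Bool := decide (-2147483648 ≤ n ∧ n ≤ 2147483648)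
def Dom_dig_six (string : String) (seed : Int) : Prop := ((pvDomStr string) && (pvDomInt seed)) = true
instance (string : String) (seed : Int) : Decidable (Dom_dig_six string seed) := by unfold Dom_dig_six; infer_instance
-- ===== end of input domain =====

-- B replaces A's build-chunk-list-then-reassemble two-pass structure by one streaming
-- pass with a 4-char buffer flushed with positions 0 and 2 swapped (objective: simpler).

-- ===== PORT A =====
-- Literal port of A: the first loop collects 4-char slices (a shorter tail slice at
-- the end) into tempStrs; the second loop rebuilds the output, swapping chars 0 and 2
-- of each length-4 chunk.  'for i in range(len(tempStrs)): … tempStrs[i] …' visits the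
-- elements in order, ported as a fold over tempStrs.
def dig_six (string : String) (seed : Int) : String :=
  let s := string.toList
  let n : Int := s.length
  let tempStrs : List (List Char) :=
    (PySem.List.pyRange 0 n 1).foldl (fun acc i =>
      if PySem.Int.mod i 4 == 0 && decide (i ≤ n - 4) then
        acc ++ [PySem.List.slice s (some i) (some (i + 4))]
      else if PySem.Int.mod i 4 == 0 && decide (i > n - 4) then
        acc ++ [PySem.List.slice s (some i) none]
      else acc) []
  let outStr : List Char :=
    tempStrs.foldl (fun acc t =>
      let tempStr :=
        if t.length == 4 then
          let tempChar0 := PySem.List.pyGetD t 0 ' '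
          let tempChar2 := PySem.List.pyGetD t 2 ' '
          [tempChar2, PySem.List.pyGetD t 1 ' ', tempChar0, PySem.List.pyGetD t 3 ' ']
        else t
      acc ++ tempStr) []
  String.ofList outStr

-- ===== PORT B =====
-- Literal port of Source B: a single fold over the characters carrying (out, buf).
def dig_six_alt (string : String) (seed : Int) : String :=
  let st := string.toList.foldl (fun (st : List Char × List Char) ch =>
      let buf := st.2 ++ [ch]
      if buf.length == 4 then
        (st.1 ++ [PySem.List.pyGetD buf 2 ' ', PySem.List.pyGetD buf 1 ' ',
                  PySem.List.pyGetD buf 0 ' ', PySem.List.pyGetD buf 3 ' '], [])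
      else (st.1, buf)) ([], [])
  String.ofList (st.1 ++ st.2)

-- ===== PRECONDITION & SPEC =====
def Spec_dig_six (string : String) (seed : Int) (out : String) : Prop := out = dig_six_alt string seed
instance (string : String) (seed : Int) (out : String) : Decidable (Spec_dig_six string seed out) := by unfold Spec_dig_six; infer_instance

-- ===== CLAIM (what is proved, stated in full; the proofs are below) =====
def Claim_equal_dig_six : Prop := ∀ (string : String) (seed : Int), Dom_dig_six string seed → Spec_dig_six string seed (dig_six string seed)

-- ===== LEMMAS AND PROOFS =====

-- Common reference function: swap chars 0 and 2 in each full 4-char chunk, leave a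
-- short tail unchanged.  Both ports are proved equal to it.
def chunkSwap : List Char → List Char
  | a :: b :: c :: d :: rest => c :: b :: a :: d :: chunkSwap rest
  | l => l

-- ---- A side ----

-- The chunk-then-reassemble pipeline, written as filter/map/flatMap, is chunkSwap.
lemma digA_eq_chunkSwap (s : List Char) :
    (((List.range s.length).filter (fun k => k % 4 == 0)).map
        (fun k => (s.drop k).take 4)).flatMap
      (fun t => if t.length == 4 then
          [t.getD 2 ' ', t.getD 1 ' ', t.getD 0 ' ', t.getD 3 ' '] else t)
    = chunkSwap s := by
  induction s using chunkSwap.induct with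
  | case1 a b c d rest ih =>
    have hlen : (a :: b :: c :: d :: rest).length = 4 + rest.length := by simp; omega
    rw [hlen, List.range_add, List.filter_append, List.map_append, List.flatMap_append]
    have h4 : (List.range 4).filter (fun k => k % 4 == 0) = [0] := by decide
    rw [h4]
    have hmap : ((List.range rest.length).map (4 + ·)).filter (fun k => k % 4 == 0)
        = ((List.range rest.length).filter (fun k => k % 4 == 0)).map (4 + ·) := by
      rw [List.filter_map]
      congr 1
      apply List.filter_congr
      intro k _
      simp
    rw [hmap, List.map_map]
    have hdrop : ∀ k, ((a :: b :: c :: d :: rest).drop (4 + k)).take 4 = (rest.drop k).take 4 := by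
      intro k; rw [← List.drop_drop]; rfl
    simp only [Function.comp_def, hdrop]
    show _ = c :: b :: a :: d :: chunkSwap rest
    rw [← ih]
    simp
  | case2 l h =>
    rcases l with _ | ⟨a, _ | ⟨b, _ | ⟨c, _ | ⟨d, t⟩⟩⟩⟩
    · simp [chunkSwap]
    · simp [chunkSwap, List.range_succ]
    · simp [chunkSwap, List.range_succ]
    · simp [chunkSwap, List.range_succ]
    · exact absurd rfl (h a b c d t)

lemma digA_main (string : String) (seed : Int) :
    dig_six string seed = String.ofList (chunkSwap string.toList) := by
  unfold dig_six
  set s := string.toList with hs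
  simp only []
  rw [PySem.List.foldl_congr_mem _ _
    (fun (acc : List (List Char)) (i : Int) =>
      if PySem.Int.mod i 4 == 0 then acc ++ [(s.drop i.toNat).take 4] else acc) _ ?_]
  · rw [PySem.List.foldl_append_if, PySem.List.pyRange_zero_natCast, List.filter_map,
        List.map_map]
    rw [PySem.List.foldl_append_eq_flatMap]
    simp only [Function.comp_def, Int.toNat_natCast]
    have hp : ∀ k : Nat, (PySem.Int.mod (k : Int) 4 == 0) = (k % 4 == 0) := by
      intro k; simp [pysem]; omega
    simp only [hp]
    rw [List.nil_append, List.nil_append]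
    have := digA_eq_chunkSwap s
    simp only [PySem.List.pyGetD_ofNat'] at *
    rw [this]
  · intro acc i hi
    rw [PySem.List.mem_pyRange_one] at hi
    by_cases hm : (4:Int) ∣ i
    · by_cases hle : i ≤ (s.length : Int) - 4
      · have : PySem.List.slice s (some i) (some (i + 4)) = (s.drop i.toNat).take 4 := by
          rw [PySem.List.slice_toNat s hi.1 (by omega)]
          congr 1; omega
        simp [hm, hle, this]
      · have h1 : PySem.List.slice s (some i) none = s.drop i.toNat :=
          PySem.List.slice_from s hi.1
        have h2 : (s.drop i.toNat).take 4 = s.drop i.toNat := by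
          apply List.take_of_length_le
          simp [List.length_drop]; omega
        simp [hm, h1, h2, show (s.length : Int) - 4 < i by omega, show ¬ (i ≤ (s.length:Int) - 4) from hle]
    · simp [hm]

-- ---- B side ----

-- Loop invariant of B's single pass: with a buffer of fewer than 4 chars, the flushed
-- output plus the remaining buffer is the accumulated output plus chunkSwap of
-- buffer-then-rest.
lemma digB_invariant (s : List Char) :
    ∀ (out buf : List Char), buf.length ≤ 3 →
      (let r := s.foldl (fun (st : List Char × List Char) ch =>
          let buf := st.2 ++ [ch]
          if buf.length == 4 then
            (st.1 ++ [PySem.List.pyGetD buf 2 ' ', PySem.List.pyGetD buf 1 ' ',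
                      PySem.List.pyGetD buf 0 ' ', PySem.List.pyGetD buf 3 ' '], [])
          else (st.1, buf)) (out, buf)
       r.1 ++ r.2) = out ++ chunkSwap (buf ++ s) := by
  induction s with
  | nil =>
    intro out buf h
    simp only [List.foldl_nil]
    rcases buf with _ | ⟨a, _ | ⟨b, _ | ⟨c, _ | ⟨d, t⟩⟩⟩⟩ <;> simp_all [chunkSwap] <;> omega
  | cons ch rest ih =>
    intro out buf h
    rcases buf with _ | ⟨a, _ | ⟨b, _ | ⟨c, _ | ⟨d, t⟩⟩⟩⟩
    · simpa [List.foldl_cons] using ih out [ch] (by simp)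
    · simpa [List.foldl_cons] using ih out [a, ch] (by simp)
    · simpa [List.foldl_cons] using ih out [a, b, ch] (by simp)
    · simp only [List.foldl_cons]
      have := ih (out ++ [c, b, a, ch]) [] (by simp)
      simp_all [chunkSwap, PySem.List.pyGetD]
    · simp at h; omega

lemma digB_main (string : String) (seed : Int) :
    dig_six_alt string seed = String.ofList (chunkSwap string.toList) := by
  unfold dig_six_alt
  simp only []
  rw [digB_invariant string.toList [] [] (by simp)]
  simp

-- ===== VERDICT (by name: the statement is the Claim_ definition above) =====
theorem dig_six_spec : Claim_equal_dig_six := by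
  intro string seed _
  unfold Spec_dig_six
  rw [digA_main string seed, digB_main string seed]
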